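-- pv_equiv track=rewrite | github.com/Gaglia88/sparker | python/sparker/blocking_utils.py | separate_profiles
-- ===== SOURCE A (Python) =====
-- def separate_profiles(elements, separators):
--     input_e = elements
--     output = []
--     for sep in separators:
--         a = [x for x in input_e if x <= sep]
--         input_e = [x for x in input_e if x > sep]
--         output.append(a)
--     output.append(input_e)
--     return list(map(lambda x: set(x), output))
-- ===== SOURCE B (Python) =====
-- def separate_profiles(elements, separators):
--     k = len(separators)
--     buckets = [[] for _ in range(k + 1)]
--     for x in elements:
--         i = 0
--         while i < k and x > separators[i]:
--             i += 1
--         buckets[i].append(x)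
--     return [set(b) for b in buckets]
-- ===== Notes on version B (the rewrite author's own statement) =====
-- stated objective: alternative
-- what changed: One pass over the elements assigning each to its first qualifying separator bucket, instead of repeatedly re-filtering the shrinking element list once per separator.
import Mathlib
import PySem

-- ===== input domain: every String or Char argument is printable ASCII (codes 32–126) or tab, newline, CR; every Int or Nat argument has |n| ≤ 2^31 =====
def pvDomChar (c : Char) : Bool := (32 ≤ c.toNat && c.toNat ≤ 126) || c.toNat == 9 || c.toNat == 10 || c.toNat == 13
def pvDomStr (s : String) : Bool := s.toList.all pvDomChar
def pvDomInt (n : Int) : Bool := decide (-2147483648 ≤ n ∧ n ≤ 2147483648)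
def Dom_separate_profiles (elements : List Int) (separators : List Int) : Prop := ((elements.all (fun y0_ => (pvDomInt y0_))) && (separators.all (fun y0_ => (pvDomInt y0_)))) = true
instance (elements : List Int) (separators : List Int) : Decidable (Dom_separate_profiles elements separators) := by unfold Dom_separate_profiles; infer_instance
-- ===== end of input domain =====

-- B replaces A's per-separator re-filtering of a shrinking list by a single pass over the
-- elements, dropping each element into the bucket of its first qualifying separator
-- (objective: alternative traversal, same asymptotic cost).

-- ===== PORT A =====
def separate_profiles (elements : List Int) (separators : List Int) : List (List Int) :=
  let st := separators.foldl
    (fun (st : List Int × List (List Int)) sep =>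
      let a := st.1.filter (fun x => decide (x ≤ sep))
      let input_e := st.1.filter (fun x => decide (x > sep))
      (input_e, st.2 ++ [a]))
    (elements, [])
  (st.2 ++ [st.1]).map (fun x => PySem.Set.ofList x)

-- ===== PORT B =====
-- transliteration of B's 'while i < k and x > separators[i]: i += 1'
def firstBucket (x : Int) : List Int → Nat
  | [] => 0
  | s :: rest => if x > s then firstBucket x rest + 1 else 0

def separate_profiles_alt (elements : List Int) (separators : List Int) : List (List Int) :=
  let buckets := List.replicate (separators.length + 1) ([] : List Int)
  let buckets := elements.foldl
    (fun bs x => bs.modify (firstBucket x separators) (fun b => b ++ [x])) buckets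
  buckets.map (fun b => PySem.Set.ofList b)

-- ===== PRECONDITION & SPEC =====
def Spec_separate_profiles (elements : List Int) (separators : List Int) (out : List (List Int)) : Prop := out = separate_profiles_alt elements separators
instance (elements : List Int) (separators : List Int) (out : List (List Int)) : Decidable (Spec_separate_profiles elements separators out) := by unfold Spec_separate_profiles; infer_instance

-- ===== CLAIM (what is proved, stated in full; the proofs are below) =====
def Claim_equal_separate_profiles : Prop := ∀ (elements : List Int) (separators : List Int), Dom_separate_profiles elements separators → Spec_separate_profiles elements separators (separate_profiles elements separators)

-- ===== LEMMAS AND PROOFS =====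

-- the common characterisation: bucket i = elements whose first qualifying separator is i
def bucketsSpec (es : List Int) (seps : List Int) : List (List Int) :=
  (List.range (seps.length + 1)).map (fun i => es.filter (fun x => firstBucket x seps == i))

theorem modify_map_range {n j : Nat} (g : Nat → List Int) (h : List Int → List Int) :
    ((List.range n).map g).modify j h
      = (List.range n).map (fun i => if i = j then h (g i) else g i) := by
  apply List.ext_getElem
  · simp
  · intro i h1 h2
    simp only [List.length_modify, List.length_map, List.length_range] at h1
    simp [List.getElem_modify, List.getElem_map, List.getElem_range]
    split
    · simp_all
    · exact (if_neg (fun h' => ‹¬ _ = _› h'.symm)).symm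

theorem foldl_buckets (es : List Int) (seps : List Int) :
    ∀ g : Nat → List Int,
    es.foldl (fun bs x => bs.modify (firstBucket x seps) (fun b => b ++ [x]))
        ((List.range (seps.length + 1)).map g)
      = (List.range (seps.length + 1)).map
          (fun i => g i ++ es.filter (fun x => firstBucket x seps == i)) := by
  induction es with
  | nil => intro g; simp
  | cons x es ih =>
      intro g
      simp only [List.foldl_cons, modify_map_range]
      rw [ih]
      apply List.map_congr_left
      intro i hi
      simp only [List.filter_cons]
      by_cases h : i = firstBucket x seps
      · simp [h, List.append_assoc]
      · have : ¬ (firstBucket x seps == i) = true := by simp [Ne.symm h]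
        simp [h, this]

theorem alt_eq_spec (es seps : List Int) :
    separate_profiles_alt es seps = (bucketsSpec es seps).map (fun b => PySem.Set.ofList b) := by
  unfold separate_profiles_alt bucketsSpec
  have hrep : List.replicate (seps.length + 1) ([] : List Int)
      = (List.range (seps.length + 1)).map (fun _ => ([] : List Int)) := by
    simp [List.map_const']
  simp only [hrep, foldl_buckets, List.nil_append]

theorem bucketsSpec_cons (es : List Int) (s : Int) (rest : List Int) :
    bucketsSpec es (s :: rest)
      = es.filter (fun x => decide (x ≤ s))
        :: bucketsSpec (es.filter (fun x => decide (x > s))) rest := by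
  unfold bucketsSpec
  simp only [List.length_cons]
  rw [List.range_succ_eq_map, List.map_cons, List.map_map]
  congr 1
  · apply List.filter_congr
    intro x _
    simp only [firstBucket]
    split <;> simp <;> omega
  · apply List.map_congr_left
    intro i _
    simp only [Function.comp]
    rw [List.filter_filter]
    apply List.filter_congr
    intro x _
    simp only [firstBucket]
    by_cases h : x > s
    · simp [h]
    · simp [h]

theorem a_core (seps : List Int) :
    ∀ (es : List Int) (acc : List (List Int)),
    (seps.foldl
        (fun (st : List Int × List (List Int)) sep =>
          (st.1.filter (fun x => decide (x > sep)), st.2 ++ [st.1.filter (fun x => decide (x ≤ sep))]))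
        (es, acc)).2
      ++ [(seps.foldl
        (fun (st : List Int × List (List Int)) sep =>
          (st.1.filter (fun x => decide (x > sep)), st.2 ++ [st.1.filter (fun x => decide (x ≤ sep))]))
        (es, acc)).1] = acc ++ bucketsSpec es seps := by
  induction seps with
  | nil =>
      intro es acc
      simp [bucketsSpec, firstBucket, List.range_succ]
  | cons s rest ih =>
      intro es acc
      simp only [List.foldl_cons]
      rw [ih, bucketsSpec_cons]
      simp [List.append_assoc]

theorem a_eq_spec (es seps : List Int) :
    separate_profiles es seps = (bucketsSpec es seps).map (fun b => PySem.Set.ofList b) := by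
  unfold separate_profiles
  dsimp only
  have := a_core seps es []
  simp only [List.nil_append] at this
  rw [this]

-- ===== VERDICT (by name: the statement is the Claim_ definition above) =====
theorem separate_profiles_spec : Claim_equal_separate_profiles := by
  intro elements separators _
  unfold Spec_separate_profiles
  rw [a_eq_spec, alt_eq_spec]
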